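-- pv_equiv track=rewrite | github.com/odylith/odylith | src/odylith/runtime/governance/validate_plan_traceability_contract.py | _extract_traceability_subsections
-- ===== SOURCE A (Python) =====
-- def _extract_traceability_subsections(lines: list[str]) -> dict[str, list[str]]:
--     buckets: dict[str, list[str]] = {}
--     current: str | None = None
--     for line in lines:
--         stripped = line.strip()
--         if stripped.startswith("### "):
--             current = stripped[4:].strip()
--             buckets.setdefault(current, [])
--             continue
--         if current is None:
--             continue
--         if not stripped:
--             continue
--         buckets.setdefault(current, []).append(line)
--     return buckets
-- ===== SOURCE B (Python) =====
-- def _extract_traceability_subsections(lines: list[str]) -> dict[str, list[str]]: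
--     def _is_header(line: str) -> bool:
--         return line.strip().startswith("### ")
--
--     buckets: dict[str, list[str]] = {}
--     n = len(lines)
--     i = 0
--     while i < n and not _is_header(lines[i]):
--         i += 1
--     while i < n:
--         name = lines[i].strip()[4:].strip()
--         j = i + 1
--         while j < n and not _is_header(lines[j]):
--             j += 1
--         bucket = buckets.setdefault(name, [])
--         bucket.extend(line for line in lines[i + 1 : j] if line.strip())
--         i = j
--     return buckets
-- ===== Notes on version B (the rewrite author's own statement) =====
-- stated objective: alternative
-- what changed: A is a single-pass state machine carrying a 'current' header across every line; B first skips the pre-header prefix, then walks the list segment by segment: at each header it scans forward to the next header and extends that header's bucket with the whole slice's non-blank lines at once.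
import Mathlib
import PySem

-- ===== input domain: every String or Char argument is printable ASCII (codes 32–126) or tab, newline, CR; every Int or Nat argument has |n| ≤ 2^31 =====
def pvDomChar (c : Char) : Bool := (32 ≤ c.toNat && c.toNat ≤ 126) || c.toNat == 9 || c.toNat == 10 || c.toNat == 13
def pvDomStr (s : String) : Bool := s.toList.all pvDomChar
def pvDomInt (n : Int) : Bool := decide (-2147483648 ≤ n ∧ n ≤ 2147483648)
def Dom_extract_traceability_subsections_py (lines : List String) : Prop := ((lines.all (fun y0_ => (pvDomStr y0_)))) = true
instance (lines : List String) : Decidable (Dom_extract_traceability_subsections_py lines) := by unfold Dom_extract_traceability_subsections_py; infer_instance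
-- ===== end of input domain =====

-- B restructures A's one-pass 'current header' state machine into prefix-skip plus
-- per-header segment slicing (objective: alternative decomposition, same cost).

-- ===== PORT A =====
-- one iteration of A's for-loop over (buckets, current)
def aStep (st : PySem.Dict String (List String) × Option String) (line : String) :
    PySem.Dict String (List String) × Option String :=
  let stripped := PySem.Str.strip line
  if PySem.Str.startswith stripped "### " then
    let current := PySem.Str.strip (PySem.Str.slice stripped (some 4) none)
    (st.1.setdefault current [], some current)
  else
    match st.2 with
    | none => st
    | some cur =>
      if stripped = "" then st
      else
        let d0 := st.1.setdefault cur []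
        (d0.insert cur (d0.getD cur [] ++ [line]), some cur)

def extract_traceability_subsections_py (lines : List String) : List (String × List String) :=
  (lines.foldl aStep (PySem.Dict.empty, none)).1.items

-- ===== PORT B =====
def bIsHeader (line : String) : Bool :=
  PySem.Str.startswith (PySem.Str.strip line) "### "

def bName (line : String) : String :=
  PySem.Str.strip (PySem.Str.slice (PySem.Str.strip line) (some 4) none)

-- B's first while loop: advance i past the pre-header prefix
def bSkip : List String → List String
  | [] => []
  | l :: ls => if bIsHeader l then l :: ls else bSkip ls

-- B's second while loop: head is a header; scan to the next header, extend its bucket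
def bGo (d : PySem.Dict String (List String)) : List String → PySem.Dict String (List String)
  | [] => d
  | l :: ls =>
    let name := bName l
    let seg := ls.takeWhile (fun x => !(bIsHeader x))
    let rest := ls.dropWhile (fun x => !(bIsHeader x))
    let d0 := d.setdefault name []
    let d1 := d0.insert name (d0.getD name [] ++ seg.filter (fun x => PySem.Str.strip x ≠ ""))
    bGo d1 rest
termination_by ls => ls.length
decreasing_by
  simp only [List.length_cons]
  exact Nat.lt_succ_of_le (List.length_dropWhile_le _ _)

def extract_traceability_subsections_py_alt (lines : List String) : List (String × List String) :=
  (bGo PySem.Dict.empty (bSkip lines)).items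

-- ===== PRECONDITION & SPEC =====
def Spec_extract_traceability_subsections_py (lines : List String) (out : List (String × List String)) : Prop := out = extract_traceability_subsections_py_alt lines
instance (lines : List String) (out : List (String × List String)) : Decidable (Spec_extract_traceability_subsections_py lines out) := by unfold Spec_extract_traceability_subsections_py; infer_instance

-- ===== CLAIM (what is proved, stated in full; the proofs are below) =====
def Claim_equal_extract_traceability_subsections_py : Prop := ∀ (lines : List String), Dom_extract_traceability_subsections_py lines → Spec_extract_traceability_subsections_py lines (extract_traceability_subsections_py lines)

-- ===== LEMMAS AND PROOFS =====

-- A ignores non-header lines while current is None, so folding A over lines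
-- equals folding it over the skipped list.
lemma foldl_aStep_skip (lines : List String) (d : PySem.Dict String (List String)) :
    lines.foldl aStep (d, none) = (bSkip lines).foldl aStep (d, none) := by
  induction lines with
  | nil => rfl
  | cons l ls ih =>
    by_cases h : bIsHeader l
    · simp [bSkip, h]
    · have hstep : aStep (d, none) l = (d, none) := by
        simp [aStep, bIsHeader] at h ⊢
        simp [h]
      simp [bSkip, h, List.foldl_cons, hstep, ih]

lemma bSkip_headed (lines : List String) :
    bSkip lines = [] ∨ ∃ l ls, bSkip lines = l :: ls ∧ bIsHeader l := by
  induction lines with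
  | nil => exact Or.inl rfl
  | cons l ls ih =>
    by_cases h : bIsHeader l
    · exact Or.inr ⟨l, ls, by simp [bSkip, h], h⟩
    · simpa [bSkip, h] using ih

-- an overwrite with the value already stored is the identity (keys unique)
lemma insert_get_self {d : PySem.Dict String (List String)} {k : String} {v : List String}
    (hnd : d.keys.Nodup) (h : d.get? k = some v) : d.insert k v = d := by
  have hc : d.contains k = true := by
    rw [PySem.Dict.contains_eq_isSome_get?, h]; rfl
  apply PySem.Dict.ext
  rw [PySem.Dict.items_insert_of_contains _ _ hc]
  have hmap : ∀ p ∈ d.items, (if (p.1 == k) = true then (k, v) else p) = p := by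
    intro p hp
    by_cases hk : p.1 = k
    · have hg : d.get? p.1 = some p.2 := PySem.Dict.get?_of_mem_items d (by simpa using hp) hnd
      rw [hk, h] at hg
      have hv2 : p.2 = v := (Option.some.inj hg).symm
      simp [hk, Prod.ext_iff, hv2]
    · simp [hk]
  rw [List.map_congr_left hmap]
  simp

-- one non-header, non-blank step appends the line to cur's bucket
lemma aStep_append (d : PySem.Dict String (List String)) (cur line : String)
    (hh : ¬ bIsHeader line) (hb : PySem.Str.strip line ≠ "") :
    aStep (d, some cur) line = (d.insert cur (d.getD cur [] ++ [line]), some cur) := by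
  simp [bIsHeader] at hh
  by_cases hc : d.contains cur
  · simp [aStep, hh, hb, PySem.Dict.setdefault_of_contains _ _ hc]
  · have hcf : d.contains cur = false := by simpa using hc
    have hg : d.getD cur [] = ([] : List String) :=
      PySem.Dict.getD_of_not_contains _ _ hcf
    simp [aStep, hh, hb, PySem.Dict.setdefault_of_not_contains _ _ hcf,
      PySem.Dict.getD_insert_self, PySem.Dict.insert_insert_self, hg]

-- folding repeated-append steps starting from an inserted bucket
lemma foldl_append_ins (fil : List String) (d : PySem.Dict String (List String))
    (cur : String) (v : List String) :
    fil.foldl (fun d l => d.insert cur (d.getD cur [] ++ [l])) (d.insert cur v)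
      = d.insert cur (v ++ fil) := by
  induction fil generalizing v with
  | nil => simp
  | cons l fl ih =>
    simp only [List.foldl_cons, PySem.Dict.getD_insert_self, PySem.Dict.insert_insert_self]
    rw [ih]
    simp

-- folding A over a headerless segment with current = some cur
lemma foldl_aStep_seg (seg : List String) (d : PySem.Dict String (List String)) (cur : String)
    (hseg : ∀ x ∈ seg, ¬ bIsHeader x) :
    seg.foldl aStep (d, some cur)
      = ((seg.filter (fun x => PySem.Str.strip x ≠ "")).foldl
          (fun d l => d.insert cur (d.getD cur [] ++ [l])) d, some cur) := by
  induction seg generalizing d with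
  | nil => rfl
  | cons l ls ih =>
    have hh : ¬ bIsHeader l := hseg l (by simp)
    have hrest : ∀ x ∈ ls, ¬ bIsHeader x := fun x hx => hseg x (by simp [hx])
    by_cases hb : PySem.Str.strip l = ""
    · have hstep : aStep (d, some cur) l = (d, some cur) := by
        simp [aStep, hb]
        intro hfalse
        exact absurd hfalse (by decide)
      simp [List.foldl_cons, hstep, ih _ hrest, hb]
    · rw [List.foldl_cons, aStep_append d cur l hh hb, ih _ hrest]
      simp [hb, foldl_append_ins]

lemma nodup_setdefault (d : PySem.Dict String (List String)) (k : String) (v : List String)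
    (hnd : d.keys.Nodup) : (d.setdefault k v).keys.Nodup := by
  by_cases hc : d.contains k
  · rwa [PySem.Dict.setdefault_of_contains _ _ hc]
  · rw [PySem.Dict.setdefault_of_not_contains _ _ (by simpa using hc)]
    exact PySem.Dict.nodup_keys_insert _ _ _ hnd

-- the per-block collapse: fold the appends = one insert of the concatenation
lemma block_collapse (d : PySem.Dict String (List String)) (cur : String)
    (fil : List String) (hnd : d.keys.Nodup) :
    fil.foldl (fun d l => d.insert cur (d.getD cur [] ++ [l])) (d.setdefault cur [])
      = (d.setdefault cur []).insert cur ((d.setdefault cur []).getD cur [] ++ fil) := by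
  by_cases hc : d.contains cur
  · rw [PySem.Dict.setdefault_of_contains _ _ hc]
    have hs : (d.get? cur).isSome := by
      rw [← PySem.Dict.contains_eq_isSome_get?, hc]
    obtain ⟨v, hv⟩ := Option.isSome_iff_exists.mp hs
    have hgd : d.getD cur [] = v := PySem.Dict.getD_of_get?_eq_some _ _ hv
    calc fil.foldl (fun d l => d.insert cur (d.getD cur [] ++ [l])) d
        = fil.foldl (fun d l => d.insert cur (d.getD cur [] ++ [l])) (d.insert cur v) := by
          rw [insert_get_self hnd hv]
      _ = d.insert cur (v ++ fil) := foldl_append_ins _ _ _ _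
      _ = _ := by rw [hgd]
  · have hcf : d.contains cur = false := by simpa using hc
    rw [PySem.Dict.setdefault_of_not_contains _ _ hcf]
    rw [foldl_append_ins]
    simp [PySem.Dict.getD_insert_self, PySem.Dict.insert_insert_self]

-- the main correspondence on header-headed (or empty) suffixes
lemma main_corr : ∀ (n : Nat) (ls : List String), ls.length ≤ n →
    ∀ (d : PySem.Dict String (List String)) (cur? : Option String),
    d.keys.Nodup →
    (ls = [] ∨ ∃ l t, ls = l :: t ∧ bIsHeader l) →
    (ls.foldl aStep (d, cur?)).1 = bGo d ls := by
  intro n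
  induction n with
  | zero =>
    intro ls hls d cur? _ _
    have : ls = [] := List.length_eq_zero_iff.mp (Nat.le_zero.mp hls)
    subst this; simp [bGo]
  | succ n ih =>
    intro ls hls d cur? hnd hhead
    rcases hhead with h | ⟨l, t, rfl, hl⟩
    · subst h; simp [bGo]
    · have hl' := hl
      simp [bIsHeader] at hl'
      have hstep : aStep (d, cur?) l = (d.setdefault (bName l) [], some (bName l)) := by
        simp [aStep, hl', bName]
      set seg := t.takeWhile (fun x => !(bIsHeader x)) with hsegdef
      set rest := t.dropWhile (fun x => !(bIsHeader x)) with hrestdef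
      have htd : t = seg ++ rest := (List.takeWhile_append_dropWhile).symm
      have hsegh : ∀ x ∈ seg, ¬ bIsHeader x := by
        intro x hx
        have := List.mem_takeWhile_imp (hsegdef ▸ hx)
        simpa using this
      have hresth : rest = [] ∨ ∃ r rs, rest = r :: rs ∧ bIsHeader r := by
        cases hr : rest with
        | nil => exact Or.inl rfl
        | cons r rs =>
          refine Or.inr ⟨r, rs, rfl, ?_⟩
          have := List.head?_dropWhile_not (fun x => !(bIsHeader x)) t
          rw [← hrestdef, hr] at this
          simpa using this
      set d1 := d.setdefault (bName l) [] with hd1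
      have hnd1 : d1.keys.Nodup := nodup_setdefault _ _ _ hnd
      set fil := seg.filter (fun x => PySem.Str.strip x ≠ "") with hfil
      have hseg := foldl_aStep_seg seg d1 (bName l) hsegh
      have hcoll := block_collapse d (bName l) fil hnd
      have hrestlen : rest.length ≤ n := by
        have h1 : rest.length ≤ t.length := List.length_dropWhile_le _ _
        have h2 : t.length + 1 ≤ n + 1 := by simpa using hls
        omega
      set d2 := d1.insert (bName l) (d1.getD (bName l) [] ++ fil) with hd2
      have hnd2 : d2.keys.Nodup := PySem.Dict.nodup_keys_insert _ _ _ hnd1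
      calc ((l :: t).foldl aStep (d, cur?)).1
          = (t.foldl aStep (d1, some (bName l))).1 := by
            rw [List.foldl_cons, hstep]
        _ = ((seg ++ rest).foldl aStep (d1, some (bName l))).1 := by rw [← htd]
        _ = (rest.foldl aStep (d2, some (bName l))).1 := by
            rw [List.foldl_append, hseg, ← hfil, hcoll]
        _ = bGo d2 rest := ih rest hrestlen d2 _ hnd2 hresth
        _ = bGo d (l :: t) := by
            conv_rhs => rw [bGo]

-- ===== VERDICT (by name: the statement is the Claim_ definition above) =====
theorem extract_traceability_subsections_py_spec : Claim_equal_extract_traceability_subsections_py := by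
  intro lines _
  unfold Spec_extract_traceability_subsections_py
  unfold extract_traceability_subsections_py extract_traceability_subsections_py_alt
  rw [foldl_aStep_skip]
  congr 1
  exact main_corr (bSkip lines).length (bSkip lines) le_rfl PySem.Dict.empty none
    PySem.Dict.nodup_keys_empty (bSkip_headed lines)
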